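-- pv_equiv track=rewrite | github.com/kiundi/Simple-valyrian-translator | server.py | valyrain_trans
-- ===== SOURCE A (Python) =====
-- def valyrain_trans(eng_sent):
--     vowel_map = {'a': 'ar', 'e': 'el', 'i': 'ir', 'o': 'or', 'u': 'ul',
--                  'A': 'Ar', 'E': 'El', 'I': 'Ir', 'O': 'Or', 'U': 'Ul'}
--
--     working_sentence = eng_sent.lower()
--
--     for original, valyrian in vowel_map.items():
--         working_sentence = working_sentence.replace(original, valyrian)
--
--     words = working_sentence.split()
--     translated_sentence = ' '.join(words[::-1])
--
--     if translated_sentence: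
--         translated_sentence = translated_sentence[0].upper() + translated_sentence[1:] + "-ys"
--
--     return translated_sentence
-- ===== SOURCE B (Python) =====
-- def valyrain_trans(eng_sent):
--     vowel_map = {'a': 'ar', 'e': 'el', 'i': 'ir', 'o': 'or', 'u': 'ul'}
--     subbed = ''.join(vowel_map.get(ch, ch) for ch in eng_sent.lower())
--     words = subbed.split()
--     translated_sentence = ' '.join(reversed(words))
--     if translated_sentence:
--         translated_sentence = translated_sentence[0].upper() + translated_sentence[1:] + "-ys"
--     return translated_sentence
-- ===== Notes on version B (the rewrite author's own statement) =====
-- stated objective: simpler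
-- what changed: Replaces the ten sequential full-string str.replace passes (half of them dead uppercase passes after lower()) with one single character traversal that appends vowel_map.get(ch, ch), and reverses the word list with reversed() instead of a slice.
import Mathlib
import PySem

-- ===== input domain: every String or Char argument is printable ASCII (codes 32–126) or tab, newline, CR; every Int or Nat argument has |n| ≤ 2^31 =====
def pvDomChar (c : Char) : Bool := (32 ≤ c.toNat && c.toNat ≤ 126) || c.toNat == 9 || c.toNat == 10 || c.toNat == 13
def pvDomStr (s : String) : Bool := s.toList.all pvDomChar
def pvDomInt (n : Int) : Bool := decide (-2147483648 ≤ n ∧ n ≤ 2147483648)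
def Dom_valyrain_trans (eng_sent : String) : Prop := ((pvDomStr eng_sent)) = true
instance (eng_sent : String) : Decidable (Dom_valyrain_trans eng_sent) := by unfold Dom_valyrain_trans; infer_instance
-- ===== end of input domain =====

-- B replaces A's ten sequential full-string replace passes by one single character
-- traversal with a vowel-map lookup (objective: simpler); behaviour is identical.

-- ===== PORT A =====
def valyrain_trans (eng_sent : String) : String :=
  let w0 := PySem.Chars.lower eng_sent.toList
  let w1 := PySem.Chars.replace w0 ['a'] ['a','r']
  let w2 := PySem.Chars.replace w1 ['e'] ['e','l']
  let w3 := PySem.Chars.replace w2 ['i'] ['i','r']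
  let w4 := PySem.Chars.replace w3 ['o'] ['o','r']
  let w5 := PySem.Chars.replace w4 ['u'] ['u','l']
  let w6 := PySem.Chars.replace w5 ['A'] ['A','r']
  let w7 := PySem.Chars.replace w6 ['E'] ['E','l']
  let w8 := PySem.Chars.replace w7 ['I'] ['I','r']
  let w9 := PySem.Chars.replace w8 ['O'] ['O','r']
  let w10 := PySem.Chars.replace w9 ['U'] ['U','l']
  let words := PySem.Chars.split₀ w10
  let t := PySem.Chars.join [' '] ((PySem.List.slice? words none none (-1)).getD [])
  if t = [] then String.ofList t
  else String.ofList (PySem.Chars.upper (t.take 1) ++ PySem.List.slice t (some 1) none ++ ['-','y','s'])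

-- ===== PORT B =====
-- Source B's vowel_map (lowercase keys only)
def pvVowelMap : PySem.Dict Char (List Char) :=
  PySem.Dict.mk [('a',['a','r']),('e',['e','l']),('i',['i','r']),('o',['o','r']),('u',['u','l'])]

def valyrain_trans_alt (eng_sent : String) : String :=
  let subbed := (PySem.Chars.lower eng_sent.toList).flatMap
      (fun ch => PySem.Dict.getD pvVowelMap ch [ch])
  let words := PySem.Chars.split₀ subbed
  let t := PySem.Chars.join [' '] words.reverse
  if t = [] then String.ofList t
  else String.ofList (PySem.Chars.upper (t.take 1) ++ PySem.List.slice t (some 1) none ++ ['-','y','s'])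

-- ===== PRECONDITION & SPEC =====
def Spec_valyrain_trans (eng_sent : String) (out : String) : Prop := out = valyrain_trans_alt eng_sent
instance (eng_sent : String) (out : String) : Decidable (Spec_valyrain_trans eng_sent out) := by unfold Spec_valyrain_trans; infer_instance

-- ===== CLAIM (what is proved, stated in full; the proofs are below) =====
def Claim_equal_valyrain_trans : Prop := ∀ (eng_sent : String), Dom_valyrain_trans eng_sent → Spec_valyrain_trans eng_sent (valyrain_trans eng_sent)

-- ===== LEMMAS AND PROOFS =====

-- Python's replace with a one-character pattern is a flatMap over the string.
theorem pvGo_single (c : Char) (new : List Char) :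
    ∀ (l acc : List Char) (fuel : Nat), l.length ≤ fuel →
      PySem.Chars.replace.go [c] new fuel l acc
        = acc.reverse ++ l.flatMap (fun x => if x = c then new else [x]) := by
  intro l
  induction l with
  | nil =>
      intro acc fuel _
      cases fuel <;> simp [PySem.Chars.replace.go]
  | cons x t ih =>
      intro acc fuel hf
      cases fuel with
      | zero => simp at hf
      | succ n =>
        by_cases hx : x = c
        · subst hx
          have hpre : [x].isPrefixOf (x :: t) = true := by simp [List.isPrefixOf]
          simp [PySem.Chars.replace.go, hpre, ih (new.reverse ++ acc) n (by simpa using hf)]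
        · have hpre : [c].isPrefixOf (x :: t) = false := by
            simp [List.isPrefixOf, BEq.beq]
            intro h; exact absurd h.symm hx
          simp [PySem.Chars.replace.go, hpre, hx, ih (x :: acc) n (by simpa using hf)]

theorem pvReplace_single (l : List Char) (c : Char) (new : List Char) :
    PySem.Chars.replace l [c] new = l.flatMap (fun x => if x = c then new else [x]) := by
  simpa [PySem.Chars.replace] using pvGo_single c new l [] l.length le_rfl

theorem pvCharLe (a b : Char) : (a ≤ b) ↔ (a.toNat ≤ b.toNat) := Iff.rfl

theorem pvNotUpper_lower (c : Char) :
    PySem.Chars.isupper (PySem.Chars.lowerChar c) = false := by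
  unfold PySem.Chars.lowerChar
  by_cases h : PySem.Chars.isupper c = true
  · simp only [h, if_true]
    have h1 : 65 ≤ c.toNat ∧ c.toNat ≤ 90 := by
      unfold PySem.Chars.isupper at h
      simp only [Bool.and_eq_true, decide_eq_true_eq, pvCharLe] at h
      have hA : (Char.toNat 'A') = 65 := by decide
      have hZ : (Char.toNat 'Z') = 90 := by decide
      omega
    have hv : Nat.isValidChar (c.toNat + 32) := Or.inl (by omega)
    have ht : (Char.ofNat (c.toNat + 32)).toNat = c.toNat + 32 := by
      rw [Char.toNat_ofNat, if_pos hv]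
    unfold PySem.Chars.isupper
    have hZ : (Char.toNat 'Z') = 90 := by decide
    have : ¬ (Char.ofNat (c.toNat + 32) ≤ 'Z') := by
      rw [pvCharLe, ht, hZ]; omega
    simp [this]
  · simp only [if_neg h]
    simpa using h

theorem pvFlatMap_congr {α β : Type} (f g : α → List β) :
    ∀ (l : List α), (∀ x ∈ l, f x = g x) → l.flatMap f = l.flatMap g := by
  intro l h
  induction l with
  | nil => rfl
  | cons x t ih =>
      simp [List.flatMap_cons, h x (by simp), ih (fun y hy => h y (by simp [hy]))]

-- pointwise value of the ten composed substitutions on a non-uppercase character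
theorem pvPointwise (c : Char) (h : PySem.Chars.isupper c = false) :
    List.flatMap
      (fun x =>
        List.flatMap
          (fun x =>
            List.flatMap
              (fun x =>
                List.flatMap
                  (fun x =>
                    List.flatMap
                      (fun x =>
                        List.flatMap
                          (fun x =>
                            List.flatMap
                              (fun x =>
                                List.flatMap
                                  (fun x =>
                                    List.flatMap (fun x => if x = 'U' then ['U', 'l'] else [x])
                                      (if x = 'O' then ['O', 'r'] else [x]))
                                  (if x = 'I' then ['I', 'r'] else [x]))
                              (if x = 'E' then ['E', 'l'] else [x]))
                          (if x = 'A' then ['A', 'r'] else [x]))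
                      (if x = 'u' then ['u', 'l'] else [x]))
                  (if x = 'o' then ['o', 'r'] else [x]))
              (if x = 'i' then ['i', 'r'] else [x]))
          (if x = 'e' then ['e', 'l'] else [x]))
      (if c = 'a' then ['a', 'r'] else [c]) =
    pvVowelMap.getD c [c] := by
  have hA : c ≠ 'A' := fun e => absurd h (by subst e; decide)
  have hE : c ≠ 'E' := fun e => absurd h (by subst e; decide)
  have hI : c ≠ 'I' := fun e => absurd h (by subst e; decide)
  have hO : c ≠ 'O' := fun e => absurd h (by subst e; decide)
  have hU : c ≠ 'U' := fun e => absurd h (by subst e; decide)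
  by_cases ha : c = 'a'; · subst ha; decide
  by_cases he : c = 'e'; · subst he; decide
  by_cases hi : c = 'i'; · subst hi; decide
  by_cases ho : c = 'o'; · subst ho; decide
  by_cases hu : c = 'u'; · subst hu; decide
  simp only [if_neg ha, List.flatMap_cons, List.flatMap_nil, List.append_nil,
    if_neg he, if_neg hi, if_neg ho, if_neg hu, if_neg hA, if_neg hE, if_neg hI,
    if_neg hO, if_neg hU]
  have ba : ('a' == c) = false := beq_eq_false_iff_ne.mpr (Ne.symm ha)
  have bb : ('e' == c) = false := beq_eq_false_iff_ne.mpr (Ne.symm he)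
  have bc : ('i' == c) = false := beq_eq_false_iff_ne.mpr (Ne.symm hi)
  have bd : ('o' == c) = false := beq_eq_false_iff_ne.mpr (Ne.symm ho)
  have be : ('u' == c) = false := beq_eq_false_iff_ne.mpr (Ne.symm hu)
  simp [pvVowelMap, PySem.Dict.getD, PySem.Dict.get?, List.find?, ba, bb, bc, bd, be]

theorem pvMain (l : List Char) (h : ∀ c ∈ l, PySem.Chars.isupper c = false) :
    PySem.Chars.replace (PySem.Chars.replace (PySem.Chars.replace (PySem.Chars.replace
      (PySem.Chars.replace (PySem.Chars.replace (PySem.Chars.replace (PySem.Chars.replace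
      (PySem.Chars.replace (PySem.Chars.replace l ['a'] ['a','r']) ['e'] ['e','l'])
      ['i'] ['i','r']) ['o'] ['o','r']) ['u'] ['u','l']) ['A'] ['A','r']) ['E'] ['E','l'])
      ['I'] ['I','r']) ['O'] ['O','r']) ['U'] ['U','l']
    = l.flatMap (fun ch => PySem.Dict.getD pvVowelMap ch [ch]) := by
  simp only [pvReplace_single, List.flatMap_assoc]
  exact pvFlatMap_congr _ _ l (fun c hc => pvPointwise c (h c hc))

-- ===== VERDICT (by name: the statement is the Claim_ definition above) =====
theorem valyrain_trans_spec : Claim_equal_valyrain_trans := by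
  intro s _
  unfold Spec_valyrain_trans
  simp only [valyrain_trans, valyrain_trans_alt]
  rw [pvMain]
  · simp [PySem.List.slice?_none_none_neg_one]
  · intro c hc
    rcases List.mem_map.mp (by simpa [PySem.Chars.lower] using hc) with ⟨d, _, rfl⟩
    exact pvNotUpper_lower d
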